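-- pv_equiv track=rewrite | github.com/ipetrushenko-softheme/codejam | contests/605/C.py | solve_slow
-- ===== SOURCE A (Python) =====
-- def solve_slow(s: str, chars: list) -> int:
--     cnt = 0
--     n = len(s)
--     unique_chars = set(chars)
--     i = 0
--     while i < n:
--         if s[i] not in unique_chars:
--             i = i + 1
--             continue
--
--         for j in range(i, n):
--             if s[j] not in unique_chars:
--                 diff = j-i
--                 cnt += (diff-1)*diff//2
--                 i = j
--                 break
--             cnt += 1
--         i = i + 1
--     return cnt
-- ===== SOURCE B (Python) =====
-- def solve_slow(s: str, chars: list) -> int: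
--     allowed = set(chars)
--     cnt = 0
--     run = 0
--     for c in s:
--         if c in allowed:
--             run += 1
--         else:
--             cnt += run * (run + 1) // 2
--             run = 0
--     return cnt + run * (run + 1) // 2
-- ===== Notes on version B (the rewrite author's own statement) =====
-- stated objective: faster
-- what changed: Replaced the index-jumping while-loop with a nested rescanning for-loop by a single linear pass that tracks the current run length of allowed characters and adds run*(run+1)//2 at the end of each maximal run.
import Mathlib
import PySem

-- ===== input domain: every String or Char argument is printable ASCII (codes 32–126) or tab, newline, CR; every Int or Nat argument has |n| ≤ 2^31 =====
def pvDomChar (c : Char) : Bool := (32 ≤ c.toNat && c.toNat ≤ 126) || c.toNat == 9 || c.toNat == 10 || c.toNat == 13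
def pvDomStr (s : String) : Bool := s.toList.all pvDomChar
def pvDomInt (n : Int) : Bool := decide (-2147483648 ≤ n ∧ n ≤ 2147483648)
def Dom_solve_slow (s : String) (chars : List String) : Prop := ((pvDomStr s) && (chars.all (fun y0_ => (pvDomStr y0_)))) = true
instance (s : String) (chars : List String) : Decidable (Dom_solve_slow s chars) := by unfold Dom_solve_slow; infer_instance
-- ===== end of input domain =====

-- B replaces A's index-jumping while-loop with a nested rescanning for-loop by one
-- linear pass adding run*(run+1)//2 per maximal run of allowed characters (return value equal).

-- shared by both ports: Python's `c in set(chars)` for a character c of s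
def pvAllowed (chars : List String) (c : Char) : Bool :=
  PySem.Set.contains (PySem.Set.ofList chars) (String.mk [c])

-- ===== PORT A =====
-- the inner `for j in range(i, n)` loop of A, run on the suffix s[j:], carrying the
-- absolute index j; returns (amount added to cnt, some j if it broke at index j, else none)
def pvInnerA (f : Char → Bool) (i : Nat) : List Char → Nat → Int × Option Nat
  | [], _ => (0, none)
  | c :: t, j =>
    if f c then
      let p := pvInnerA f i t (j + 1)
      (p.1 + 1, p.2)
    else
      (PySem.Int.floordiv (((j : Int) - (i : Int) - 1) * ((j : Int) - (i : Int))) 2, some j)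

theorem pvInnerA_break_ge (f : Char → Bool) (i : Nat) :
    ∀ (l : List Char) (j j' : Nat), (pvInnerA f i l j).2 = some j' → j ≤ j' := by
  intro l
  induction l with
  | nil => intro j j' h; simp [pvInnerA] at h
  | cons c t ih =>
    intro j j' h
    by_cases hc : f c
    · simp only [pvInnerA, hc, if_true] at h
      exact Nat.le_of_succ_le (ih (j + 1) j' h)
    · simp [pvInnerA, hc] at h
      omega

-- Python's `i = j; break` followed by `i = i + 1` (break case), resp. `i = i + 1` (no break)
def pvNext (i : Nat) : Option Nat → Nat
  | some j => j + 1
  | none => i + 1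

-- the outer `while i < n` loop of A
def pvOuterA (f : Char → Bool) (cs : List Char) (n : Nat) (i : Nat) (cnt : Int) : Int :=
  if h : i < n then
    if f (cs.getD i ' ') then
      let p := pvInnerA f i (cs.drop i) i
      pvOuterA f cs n (pvNext i p.2) (cnt + p.1)
    else pvOuterA f cs n (i + 1) cnt
  else cnt
termination_by n - i
decreasing_by
  · cases hp : (pvInnerA f i (cs.drop i) i).2 with
    | some j =>
      have := pvInnerA_break_ge f i (cs.drop i) i j hp
      simp only [pvNext]
      omega
    | none => simp only [pvNext]; omega
  · omega

def solve_slow (s : String) (chars : List String) : Int :=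
  pvOuterA (pvAllowed chars) s.toList s.toList.length 0 0

-- ===== PORT B =====
def solve_slow_alt (s : String) (chars : List String) : Int :=
  let f := pvAllowed chars
  let p := s.toList.foldl
    (fun (p : Int × Int) c =>
      if f c then (p.1, p.2 + 1)
      else (p.1 + PySem.Int.floordiv (p.2 * (p.2 + 1)) 2, 0))
    (0, 0)
  p.1 + PySem.Int.floordiv (p.2 * (p.2 + 1)) 2

-- ===== PRECONDITION & SPEC =====
def Spec_solve_slow (s : String) (chars : List String) (out : Int) : Prop := out = solve_slow_alt s chars
instance (s : String) (chars : List String) (out : Int) : Decidable (Spec_solve_slow s chars out) := by unfold Spec_solve_slow; infer_instance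

-- ===== CLAIM (what is proved, stated in full; the proofs are below) =====
def Claim_equal_solve_slow : Prop := ∀ (s : String) (chars : List String), Dom_solve_slow s chars → Spec_solve_slow s chars (solve_slow s chars)

-- ===== LEMMAS AND PROOFS =====

-- triangular number r*(r+1)//2
def pvT (r : Int) : Int := PySem.Int.floordiv (r * (r + 1)) 2

-- reference recursion: B's loop with the run-length state made explicit
def pvG (f : Char → Bool) : List Char → Int → Int
  | [], run => pvT run
  | c :: t, run => if f c then pvG f t (run + 1) else pvT run + pvG f t 0

theorem pvT_zero : pvT 0 = 0 := by decide

theorem pvT_step (r : Int) :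
    pvT r = r + PySem.Int.floordiv ((r - 1) * r) 2 := by
  unfold pvT
  rw [PySem.Int.floordiv_eq_ediv_of_pos (by norm_num),
      PySem.Int.floordiv_eq_ediv_of_pos (by norm_num)]
  have h1 : r * (r + 1) = (r - 1) * r + r * 2 := by ring
  rw [h1, Int.add_mul_ediv_right _ _ (by norm_num)]
  ring

theorem pvT_succ (r : Int) : pvT (r + 1) = (r + 1) + pvT r := by
  rw [pvT_step (r + 1)]
  unfold pvT
  congr 2
  ring

theorem pvG_all (f : Char → Bool) :
    ∀ (l : List Char) (run : Int), (∀ c ∈ l, f c = true) →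
      pvG f l run = pvT (run + l.length) := by
  intro l
  induction l with
  | nil => intro run _; simp [pvG]
  | cons c t ih =>
    intro run hall
    have hc : f c = true := hall c (by simp)
    simp only [pvG, hc, if_true]
    rw [ih (run + 1) (fun x hx => hall x (by simp [hx]))]
    congr 1
    push_cast [List.length_cons]
    ring

theorem pvG_split (f : Char → Bool) :
    ∀ (a : List Char) (c : Char) (b : List Char) (run : Int),
      (∀ x ∈ a, f x = true) → f c = false →
      pvG f (a ++ c :: b) run = pvT (run + a.length) + pvG f b 0 := by
  intro a
  induction a with
  | nil => intro c b run _ hc; simp [pvG, hc]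
  | cons x t ih =>
    intro c b run hall hc
    have hx : f x = true := hall x (by simp)
    simp only [List.cons_append, pvG, hx, if_true]
    rw [ih c b (run + 1) (fun y hy => hall y (by simp [hy])) hc]
    congr 2
    push_cast [List.length_cons]
    ring

theorem pvInnerA_all (f : Char → Bool) (i : Nat) :
    ∀ (l : List Char) (j : Nat), (∀ c ∈ l, f c = true) →
      pvInnerA f i l j = ((l.length : Int), none) := by
  intro l
  induction l with
  | nil => intro j _; simp [pvInnerA]
  | cons c t ih =>
    intro j hall
    have hc : f c = true := hall c (by simp)
    simp only [pvInnerA, hc, if_true, ih (j + 1) (fun x hx => hall x (by simp [hx]))]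
    simp

theorem pvInnerA_split (f : Char → Bool) (i : Nat) :
    ∀ (a : List Char) (c : Char) (b : List Char) (j : Nat),
      (∀ x ∈ a, f x = true) → f c = false →
      pvInnerA f i (a ++ c :: b) j =
        ((a.length : Int) +
          PySem.Int.floordiv ((((j + a.length : Nat) : Int) - (i : Int) - 1) *
            (((j + a.length : Nat) : Int) - (i : Int))) 2,
         some (j + a.length)) := by
  intro a
  induction a with
  | nil => intro c b j _ hc; simp [pvInnerA, hc]
  | cons x t ih =>
    intro c b j hall hc
    have hx : f x = true := hall x (by simp)
    have hlen : j + 1 + t.length = j + (x :: t).length := by simp [List.length_cons]; omega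
    simp only [List.cons_append, pvInnerA, hx, if_true,
      ih c b (j + 1) (fun y hy => hall y (by simp [hy])) hc]
    rw [hlen]
    simp only [Prod.mk.injEq, List.length_cons, and_true]
    push_cast
    ring

theorem pvFoldB (f : Char → Bool) :
    ∀ (l : List Char) (cnt run : Int),
      (l.foldl
        (fun (p : Int × Int) c =>
          if f c then (p.1, p.2 + 1)
          else (p.1 + PySem.Int.floordiv (p.2 * (p.2 + 1)) 2, 0))
        (cnt, run)).1 +
      PySem.Int.floordiv ((l.foldl
        (fun (p : Int × Int) c =>
          if f c then (p.1, p.2 + 1)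
          else (p.1 + PySem.Int.floordiv (p.2 * (p.2 + 1)) 2, 0))
        (cnt, run)).2 * ((l.foldl
        (fun (p : Int × Int) c =>
          if f c then (p.1, p.2 + 1)
          else (p.1 + PySem.Int.floordiv (p.2 * (p.2 + 1)) 2, 0))
        (cnt, run)).2 + 1)) 2 = cnt + pvG f l run := by
  intro l
  induction l with
  | nil => intro cnt run; simp [pvG, pvT]
  | cons c t ih =>
    intro cnt run
    by_cases hc : f c
    · simp only [List.foldl_cons, hc, if_true, pvG]
      exact ih cnt (run + 1)
    · simp only [List.foldl_cons, hc, pvG, Bool.false_eq_true, ite_false]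
      rw [ih (cnt + PySem.Int.floordiv (run * (run + 1)) 2) 0]
      show _ = cnt + (pvT run + pvG f t 0)
      unfold pvT
      ring

theorem pvOuterA_eq (f : Char → Bool) (cs : List Char) :
    ∀ (k i : Nat) (cnt : Int), cs.length - i ≤ k →
      pvOuterA f cs cs.length i cnt = cnt + pvG f (cs.drop i) 0 := by
  intro k
  induction k with
  | zero =>
    intro i cnt hk
    have hni : ¬ i < cs.length := by omega
    rw [pvOuterA, dif_neg hni, List.drop_of_length_le (by omega)]
    simp [pvG, pvT_zero]
  | succ k ih =>
    intro i cnt hk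
    by_cases h : i < cs.length
    · have hdrop : cs.drop i = cs[i] :: cs.drop (i + 1) := List.drop_eq_getElem_cons h
      have hget : cs.getD i ' ' = cs[i] := List.getD_eq_getElem cs ' ' h
      rw [pvOuterA, dif_pos h, hget]
      by_cases hc : f cs[i]
      · rw [if_pos hc]
        by_cases hall : ∀ c ∈ cs.drop i, f c = true
        · -- the remaining suffix is entirely allowed: the inner loop runs to the end
          rw [pvInnerA_all f i (cs.drop i) i hall]
          have hrec := ih (i + 1) (cnt + ((cs.drop i).length : Int)) (by omega)
          simp only [pvNext] at hrec ⊢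
          rw [hrec]
          have htail : ∀ c ∈ cs.drop (i + 1), f c = true := by
            intro c hcmem
            exact hall c (by rw [hdrop]; exact List.mem_cons_of_mem _ hcmem)
          rw [pvG_all f (cs.drop i) 0 hall, pvG_all f (cs.drop (i + 1)) 0 htail,
            zero_add, zero_add]
          have hlen : (cs.drop i).length = (cs.drop (i + 1)).length + 1 := by
            simp only [List.length_drop]; omega
          rw [hlen]
          push_cast
          rw [pvT_succ]
          ring
        · -- the inner loop breaks at the first disallowed character
          have hl : (cs.drop i).dropWhile f ≠ [] := by
            intro hnil
            apply hall
            intro c hcmem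
            have hsw := List.takeWhile_append_dropWhile (p := f) (l := cs.drop i)
            rw [hnil, List.append_nil] at hsw
            rw [← hsw] at hcmem
            exact List.mem_takeWhile_imp hcmem
          obtain ⟨c0, b, hrcons⟩ := List.exists_cons_of_ne_nil hl
          have hc0 : f c0 = false := by
            have hh := List.head_dropWhile_not f hl
            simp only [hrcons, List.head_cons] at hh
            simpa using hh
          obtain ⟨a, ha⟩ : ∃ a, (cs.drop i).takeWhile f = a := ⟨_, rfl⟩
          have hatrue : ∀ x ∈ a, f x = true := by
            intro x hx
            rw [← ha] at hx
            exact List.mem_takeWhile_imp hx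
          have hdecomp : cs.drop i = a ++ c0 :: b := by
            rw [← ha, ← hrcons]
            exact (List.takeWhile_append_dropWhile).symm
          rw [hdecomp, pvInnerA_split f i a c0 b i hatrue hc0]
          simp only [pvNext]
          have h1 : cs.drop (i + a.length) = c0 :: b := by
            rw [← List.drop_drop, hdecomp, List.drop_left]
          have hdropnext : cs.drop (i + a.length + 1) = b := by
            rw [← List.drop_drop, h1]
            simp
          have hrec := ih (i + a.length + 1)
            (cnt + ((a.length : Int) +
              PySem.Int.floordiv ((((i + a.length : Nat) : Int) - (i : Int) - 1) *
                (((i + a.length : Nat) : Int) - (i : Int))) 2)) (by omega)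
          rw [hrec, hdropnext, pvG_split f a c0 b 0 hatrue hc0]
          have hd : ((i + a.length : Nat) : Int) - (i : Int) = (a.length : Int) := by
            push_cast; ring
          rw [hd, zero_add, pvT_step ((a.length : Int))]
          ring
      · rw [if_neg hc, ih (i + 1) cnt (by omega)]
        rw [hdrop]
        simp [pvG, hc, pvT_zero]
    · rw [pvOuterA, dif_neg h, List.drop_of_length_le (by omega)]
      simp [pvG, pvT_zero]

-- ===== VERDICT (by name: the statement is the Claim_ definition above) =====
theorem solve_slow_spec : Claim_equal_solve_slow := by
  intro s chars _
  unfold Spec_solve_slow solve_slow solve_slow_alt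
  rw [pvOuterA_eq (pvAllowed chars) s.toList s.toList.length 0 0 (by omega)]
  rw [pvFoldB (pvAllowed chars) s.toList 0 0]
  simp
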